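-- pv_equiv track=rewrite | github.com/TheNoteTaker/sprouts-regex-tool | old_script.py | segment_lists
-- ===== SOURCE A (Python) =====
-- from typing import List, Tuple, Union
--
-- def segment_lists(lines: List[str]) -> List[List[str]]:
--     """Segment the provided list of lines based on the criteria: when the next number in the file is less than the previous number, it indicates a new segment."""
--     segmented_lists = []
--     current_segment = []
--     last_item = None
--
--     for item in lines:
--         if last_item and int(item) < int(last_item):
--             segmented_lists.append(current_segment)
--             current_segment = []
--         current_segment.append(item)
--         last_item = item
--
--     segmented_lists.append(current_segment)
--     return segmented_lists
-- ===== SOURCE B (Python) =====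
-- def segment_lists(lines):
--     """Segment lines by first collecting the boundary indices, then slicing."""
--     breaks = [i for i, (p, c) in enumerate(zip(lines, lines[1:]), 1)
--               if p and int(c) < int(p)]
--     bounds = [0, *breaks, len(lines)]
--     return [lines[a:b] for a, b in zip(bounds, bounds[1:])]
-- ===== Notes on version B (the rewrite author's own statement) =====
-- stated objective: alternative
-- what changed: B first collects the boundary indices (where the previous line is truthy and the next int is smaller) in one comprehension over zipped neighbour pairs, then builds the segments by slicing between consecutive boundaries, instead of A's single stateful loop that appends item-by-item into a growing current segment.
import Mathlib
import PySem

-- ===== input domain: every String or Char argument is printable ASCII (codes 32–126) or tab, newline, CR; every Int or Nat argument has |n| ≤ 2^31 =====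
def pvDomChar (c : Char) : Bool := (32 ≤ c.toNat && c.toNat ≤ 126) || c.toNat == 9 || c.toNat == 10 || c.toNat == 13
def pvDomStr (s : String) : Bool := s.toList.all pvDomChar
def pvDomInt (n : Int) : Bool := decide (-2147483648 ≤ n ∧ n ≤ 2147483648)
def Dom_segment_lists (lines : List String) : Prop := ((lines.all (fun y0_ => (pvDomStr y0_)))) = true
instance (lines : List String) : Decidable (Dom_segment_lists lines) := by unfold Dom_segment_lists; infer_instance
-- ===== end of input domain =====

-- B segments by collecting boundary indices and slicing between them, instead of A's
-- stateful append-item-by-item loop (objective: alternative decomposition, same O(n) cost).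

-- ===== PORT A =====
-- int(s) is ported as (PySem.Int.ofStr? s).getD 0; exact within Pre_ (int() succeeds wherever it is evaluated).
def segment_lists (lines : List String) : List (List String) :=
  let st := lines.foldl
    (fun (st : List (List String) × List String × Option String) item =>
      if (match st.2.2 with
          | some p => (p != "") && ((PySem.Int.ofStr? item).getD 0 < (PySem.Int.ofStr? p).getD 0)
          | none => false)
      then (st.1 ++ [st.2.1], ([item], some item))
      else (st.1, (st.2.1 ++ [item], some item)))
    ([], ([], none))
  st.1 ++ [st.2.1]

-- ===== PORT B =====
-- lines[1:] is ported as lines.tail (PySem.List.slice_from_one); int(s) as in port A.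
def segment_lists_alt (lines : List String) : List (List String) :=
  let breaks : List Int :=
    ((PySem.List.enumerate (lines.zip lines.tail) 1).filter (fun ic =>
      (ic.2.1 != "") && ((PySem.Int.ofStr? ic.2.2).getD 0 < (PySem.Int.ofStr? ic.2.1).getD 0))).map (·.1)
  let bounds : List Int := 0 :: breaks ++ [(lines.length : Int)]
  (bounds.zip bounds.tail).map (fun ab => PySem.List.slice lines (some ab.1) (some ab.2))

-- ===== PRECONDITION & SPEC =====
-- Pre_ excludes exactly the inputs where A raises ValueError: some adjacent pair has a
-- truthy (non-empty) left line but one of the two lines is not a valid int literal.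
def Pre_segment_lists (lines : List String) : Prop :=
  ∀ pc ∈ lines.zip lines.tail, pc.1 ≠ "" →
    (PySem.Int.ofStr? pc.2).isSome = true ∧ (PySem.Int.ofStr? pc.1).isSome = true
instance (lines : List String) : Decidable (Pre_segment_lists lines) := by
  unfold Pre_segment_lists; infer_instance
def pvWitness_segment_lists : List String := ["3", "5", "2", " 4 "]
def Spec_segment_lists (lines : List String) (out : List (List String)) : Prop := out = segment_lists_alt lines
instance (lines : List String) (out : List (List String)) : Decidable (Spec_segment_lists lines out) := by unfold Spec_segment_lists; infer_instance

-- ===== CLAIM (what is proved, stated in full; the proofs are below) =====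
def Claim_equal_segment_lists : Prop := ∀ (lines : List String), Dom_segment_lists lines → Pre_segment_lists lines → Spec_segment_lists lines (segment_lists lines)

-- ===== LEMMAS AND PROOFS =====

-- the break test shared by both proofs
def pvBrk (p c : String) : Bool :=
  (p != "") && ((PySem.Int.ofStr? c).getD 0 < (PySem.Int.ofStr? p).getD 0)

def pvOptBrk : Option String → String → Bool
  | some p, c => pvBrk p c
  | none, _ => false

-- reference segmentation, structural recursion
def pvMapHead (x : String) : List (List String) → List (List String)
  | [] => []
  | s :: ss => (x :: s) :: ss

def pvChop : Option String → List String → List (List String)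
  | _, [] => [[]]
  | p, x :: r =>
    if pvOptBrk p x then [] :: pvMapHead x (pvChop (some x) r)
    else pvMapHead x (pvChop (some x) r)

-- 0-based boundary positions of pvChop
def pvBks : Option String → List String → List Nat
  | _, [] => []
  | p, x :: r =>
    if pvOptBrk p x then 0 :: (pvBks (some x) r).map (· + 1)
    else (pvBks (some x) r).map (· + 1)

def pvPreCat (c : List String) : List (List String) → List (List String)
  | [] => []
  | s :: ss => (c ++ s) :: ss

lemma pvChop_ne_nil (xs : List String) : ∀ p, pvChop p xs ≠ [] := by
  induction xs with
  | nil => intro p; simp [pvChop]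
  | cons x r ih =>
    intro p
    obtain ⟨s, ss, h⟩ := List.exists_cons_of_ne_nil (ih (some x))
    simp only [pvChop, h]
    split <;> simp [pvMapHead]

lemma pvPreCat_mapHead (c : List String) (x : String) (t : List (List String)) :
    pvPreCat c (pvMapHead x t) = pvPreCat (c ++ [x]) t := by
  cases t <;> simp [pvPreCat, pvMapHead]

lemma pvPreCat_single (x : String) (t : List (List String)) :
    pvPreCat [x] t = pvMapHead x t := by
  cases t <;> simp [pvPreCat, pvMapHead]

-- A's fold, with general accumulator, computes pvChop
lemma pvFoldA (xs : List String) (segs : List (List String)) (cur : List String)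
    (last : Option String) :
    (xs.foldl
      (fun (st : List (List String) × List String × Option String) item =>
        if (match st.2.2 with
            | some p => (p != "") && ((PySem.Int.ofStr? item).getD 0 < (PySem.Int.ofStr? p).getD 0)
            | none => false)
        then (st.1 ++ [st.2.1], ([item], some item))
        else (st.1, (st.2.1 ++ [item], some item)))
      (segs, (cur, last))).1
    ++ [(xs.foldl
      (fun (st : List (List String) × List String × Option String) item =>
        if (match st.2.2 with
            | some p => (p != "") && ((PySem.Int.ofStr? item).getD 0 < (PySem.Int.ofStr? p).getD 0)
            | none => false)
        then (st.1 ++ [st.2.1], ([item], some item))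
        else (st.1, (st.2.1 ++ [item], some item)))
      (segs, (cur, last))).2.1]
    = segs ++ pvPreCat cur (pvChop last xs) := by
  induction xs generalizing segs cur last with
  | nil => simp [pvChop, pvPreCat]
  | cons x r ih =>
    have hb : (match last with
        | some p => (p != "") && ((PySem.Int.ofStr? x).getD 0 < (PySem.Int.ofStr? p).getD 0)
        | none => false) = pvOptBrk last x := by
      cases last <;> rfl
    simp only [List.foldl_cons, hb]
    by_cases h : pvOptBrk last x = true
    · simp only [h, if_true, ih, pvChop]
      rw [pvPreCat_single]
      cases pvMapHead x (pvChop (some x) r) <;> simp [pvPreCat]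
    · simp only [h, Bool.false_eq_true, if_false, ih, pvChop]
      rw [pvPreCat_mapHead]

lemma segment_lists_eq_chop (lines : List String) :
    segment_lists lines = pvChop none lines := by
  have := pvFoldA lines [] [] none
  simp only [List.nil_append] at this
  rw [segment_lists, this]
  cases t : pvChop none lines with
  | nil => exact absurd t (pvChop_ne_nil _ _)
  | cons s ss => simp [pvPreCat]

-- boundary positions of neighbour pairs
def pvPairBks : List (String × String) → List Nat
  | [] => []
  | pc :: t =>
    if pvBrk pc.1 pc.2 then 0 :: (pvPairBks t).map (· + 1)
    else (pvPairBks t).map (· + 1)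

lemma pvEnumFilt (l : List (String × String)) (s : Nat) :
    ((PySem.List.enumerate l (s : Int)).filter (fun ic =>
        (ic.2.1 != "") && ((PySem.Int.ofStr? ic.2.2).getD 0 < (PySem.Int.ofStr? ic.2.1).getD 0))).map (·.1)
      = (pvPairBks l).map (fun n => ((n + s : Nat) : Int)) := by
  induction l generalizing s with
  | nil => simp [PySem.List.enumerate_nil, pvPairBks]
  | cons pc t ih =>
    rw [PySem.List.enumerate_cons]
    simp only [List.filter_cons]
    have h1 : ((s : Int) + 1) = ((s + 1 : Nat) : Int) := by push_cast; ring
    by_cases h : (pc.1 != "" && decide ((PySem.Int.ofStr? pc.2).getD 0 < (PySem.Int.ofStr? pc.1).getD 0)) = true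
    · rw [if_pos h, h1]
      simp only [List.map_cons, ih]
      have hpb : pvPairBks (pc :: t) = 0 :: (pvPairBks t).map (· + 1) := by
        simp only [pvPairBks, pvBrk]; rw [if_pos h]
      rw [hpb]
      simp only [List.map_cons, List.map_map]
      refine congrArg₂ _ (by push_cast; ring) ?_
      apply List.map_congr_left; intro a _
      simp only [Function.comp_apply]; congr 1; omega
    · rw [if_neg h, h1]
      simp only [ih]
      have hpb : pvPairBks (pc :: t) = (pvPairBks t).map (· + 1) := by
        simp only [pvPairBks, pvBrk]; rw [if_neg h]
      rw [hpb, List.map_map]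
      apply List.map_congr_left; intro a _
      simp only [Function.comp_apply]; congr 1; omega

lemma pvZipBks (r : List String) (q : String) :
    pvPairBks ((q :: r).zip r) = pvBks (some q) r := by
  induction r generalizing q with
  | nil => simp [pvPairBks, pvBks]
  | cons c t ih => simp [List.zip_cons_cons, pvPairBks, pvBks, pvOptBrk, ih]

-- slicing between consecutive bounds
def pvSliceSeg (xs : List String) (bounds : List Int) : List (List String) :=
  (bounds.zip bounds.tail).map (fun ab => PySem.List.slice xs (some ab.1) (some ab.2))

lemma pvSliceSeg_cons (xs : List String) (a b : Int) (t : List Int) :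
    pvSliceSeg xs (a :: b :: t) = PySem.List.slice xs (some a) (some b) :: pvSliceSeg xs (b :: t) := by
  simp [pvSliceSeg, List.zip_cons_cons]

-- shifting every bound by one while consing x on the front
lemma pvShiftTail (x : String) (r : List String) (a : Nat) (T : List Nat) :
    pvSliceSeg (x :: r) (((a + 1 : Nat) : Int) :: T.map (fun n => ((n + 1 : Nat) : Int)))
      = pvSliceSeg r (((a : Nat) : Int) :: T.map (fun n => ((n : Nat) : Int))) := by
  induction T generalizing a with
  | nil => simp [pvSliceSeg]
  | cons n T' ih =>
    simp only [List.map_cons, pvSliceSeg_cons, ih]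
    congr 1
    rw [PySem.List.slice_natCast, PySem.List.slice_natCast]
    simp [Nat.add_sub_add_right]

lemma pvShiftHead (x : String) (r : List String) (T : List Nat) :
    pvSliceSeg (x :: r) ((0 : Int) :: T.map (fun n => ((n + 1 : Nat) : Int)))
      = pvMapHead x (pvSliceSeg r ((0 : Int) :: T.map (fun n => ((n : Nat) : Int)))) := by
  cases T with
  | nil => simp [pvSliceSeg, pvMapHead]
  | cons n T' =>
    simp only [List.map_cons, pvSliceSeg_cons]
    have h0 : ((0 : Int)) = ((0 : Nat) : Int) := by norm_num
    rw [h0, PySem.List.slice_natCast, PySem.List.slice_natCast, pvShiftTail]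
    simp [pvMapHead]

lemma pvSlice00 {α : Type} (xs : List α) : PySem.List.slice xs (some 0) (some 0) = [] := by
  have h := PySem.List.slice_natCast (xs := xs) (a := 0) (b := 0)
  simpa using h

-- main: slicing at the pvBks bounds computes pvChop
lemma pvSliceChop (xs : List String) (p : Option String) :
    pvSliceSeg xs ((0 : Int) :: ((pvBks p xs).map (fun n => ((n : Nat) : Int)) ++ [((xs.length : Nat) : Int)]))
      = pvChop p xs := by
  induction xs generalizing p with
  | nil =>
    have h0 : ((0 : Int)) = ((0 : Nat) : Int) := by norm_num
    simp only [pvBks, List.map_nil, List.nil_append, List.length_nil, pvChop]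
    rw [pvSliceSeg_cons, h0, PySem.List.slice_natCast]
    simp [pvSliceSeg]
  | cons x r ih =>
    have key : pvSliceSeg (x :: r)
        ((0 : Int) :: (((pvBks (some x) r).map (· + 1)).map (fun n => ((n : Nat) : Int))
          ++ [(((x :: r).length : Nat) : Int)]))
        = pvMapHead x (pvChop (some x) r) := by
      have hlen : (((x :: r).length : Nat) : Int) = ((r.length + 1 : Nat) : Int) := by
        simp [List.length_cons]
      have hmaps : ((pvBks (some x) r).map (· + 1)).map (fun n => ((n : Nat) : Int))
            ++ [((r.length + 1 : Nat) : Int)]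
          = ((pvBks (some x) r) ++ [r.length]).map (fun n => ((n + 1 : Nat) : Int)) := by
        simp [List.map_map, Function.comp]
      have hmaps2 : (pvBks (some x) r).map (fun n => ((n : Nat) : Int)) ++ [((r.length : Nat) : Int)]
          = ((pvBks (some x) r) ++ [r.length]).map (fun n => ((n : Nat) : Int)) := by
        simp
      rw [hlen, hmaps, pvShiftHead, ← ih (some x)]
      congr 1
      rw [hmaps2]
    simp only [pvBks, pvChop]
    by_cases h : pvOptBrk p x = true
    · simp only [h, if_pos, List.map_cons, List.cons_append]
      rw [pvSliceSeg_cons]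
      simp only [Nat.cast_zero, pvSlice00]
      rw [key]
    · simp only [h, Bool.false_eq_true, if_false]
      exact key

lemma segment_lists_alt_eq_chop (lines : List String) :
    segment_lists_alt lines = pvChop none lines := by
  show pvSliceSeg lines ((0 : Int) ::
      ((PySem.List.enumerate (lines.zip lines.tail) 1).filter _).map (·.1) ++ [(lines.length : Int)])
    = _
  have hbrk : ((PySem.List.enumerate (lines.zip lines.tail) (1 : Int)).filter (fun ic =>
        (ic.2.1 != "") && ((PySem.Int.ofStr? ic.2.2).getD 0 < (PySem.Int.ofStr? ic.2.1).getD 0))).map (·.1)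
      = (pvBks none lines).map (fun n => ((n : Nat) : Int)) := by
    have h1 : ((1 : Int)) = ((1 : Nat) : Int) := by norm_num
    rw [h1, pvEnumFilt]
    cases lines with
    | nil => simp [pvPairBks, pvBks]
    | cons x r =>
      rw [List.tail_cons, pvZipBks]
      have : pvBks none (x :: r) = (pvBks (some x) r).map (· + 1) := by
        simp [pvBks, pvOptBrk]
      rw [this, List.map_map]
      apply List.map_congr_left; intro a _; simp [Function.comp]
  rw [hbrk, List.cons_append, pvSliceChop]

-- ===== VERDICT (by name: the statement is the Claim_ definition above) =====
theorem segment_lists_spec : Claim_equal_segment_lists := by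
  intro lines _ _
  unfold Spec_segment_lists
  rw [segment_lists_eq_chop, segment_lists_alt_eq_chop]
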